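-- pv_equiv track=rewrite | github.com/GuilhermeTavares4/aed1 | exercicios/exercicios_avancados_funcoes/08-compactacao_strings.py | separa_num_letra
-- ===== SOURCE A (Python) =====
-- def separa_num_letra(string):
--     vetor = []
--     valor = ""
--     i = 0
--     while i < len(string):
--         if ord(string[i]) >= 65 and ord(string[i]) <= 122:
--             if valor != "":
--                 vetor.append(valor)
--                 valor = ""
--             vetor.append(string[i])
--
--         else:
--             valor += string[i]
--         i += 1
--     if valor != "":
--         vetor.append(valor)
--     return vetor
-- ===== SOURCE B (Python) =====
-- def separa_num_letra(string):
--     out = []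
--     i = 0
--     n = len(string)
--     while i < n:
--         if 65 <= ord(string[i]) <= 122:
--             out.append(string[i])
--             i += 1
--         else:
--             j = i
--             while j < n and not (65 <= ord(string[j]) <= 122):
--                 j += 1
--             out.append(string[i:j])
--             i = j
--     return out
-- ===== Notes on version B (the rewrite author's own statement) =====
-- stated objective: alternative
-- what changed: Replaced A's lazily-flushed pending-buffer accumulator with a greedy tokenizer that emits each in-range (ord 65-122) character directly and extracts each maximal run of other characters in one inner scan plus a slice, with no carried buffer.
import Mathlib
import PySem

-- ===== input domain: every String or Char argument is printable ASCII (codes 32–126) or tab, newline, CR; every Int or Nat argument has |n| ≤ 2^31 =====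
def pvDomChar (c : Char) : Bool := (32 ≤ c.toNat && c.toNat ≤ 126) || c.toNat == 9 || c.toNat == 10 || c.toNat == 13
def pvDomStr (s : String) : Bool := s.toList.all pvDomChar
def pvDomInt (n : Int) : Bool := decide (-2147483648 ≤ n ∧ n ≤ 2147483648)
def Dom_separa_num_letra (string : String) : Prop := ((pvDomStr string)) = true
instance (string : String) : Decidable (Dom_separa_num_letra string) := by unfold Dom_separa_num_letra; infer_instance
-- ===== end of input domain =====

-- B is an alternative, buffer-free tokenizer: same O(n) cost, different structure.

-- the test `65 <= ord(c) <= 122`, shared verbatim by both Pythons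
def pvIsL (c : Char) : Bool := 65 ≤ c.toNat && c.toNat ≤ 122

-- ===== PORT A =====
-- A's while loop: state = (vetor, valor); lazy flush of the pending buffer valor.
-- valor is carried as List Char (Python string concatenation valor += c), materialised by String.ofList.
def pvLoopA : List Char → List String → List Char → List String
  | [], vetor, valor => if valor ≠ [] then vetor ++ [String.ofList valor] else vetor
  | c :: rest, vetor, valor =>
    if pvIsL c then
      pvLoopA rest ((if valor ≠ [] then vetor ++ [String.ofList valor] else vetor) ++ [String.ofList [c]]) []
    else
      pvLoopA rest vetor (valor ++ [c])

def separa_num_letra (string : String) : List String := pvLoopA string.toList [] []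

-- ===== PORT B =====
-- B's outer while loop; the inner `while j < n and not letter` scan plus slice string[i:j]
-- is the takeWhile/dropWhile of the non-letter run.
def pvGoB : List Char → List String
  | [] => []
  | c :: rest =>
    if pvIsL c then String.ofList [c] :: pvGoB rest
    else String.ofList (c :: rest.takeWhile (fun d => !pvIsL d)) :: pvGoB (rest.dropWhile (fun d => !pvIsL d))
  termination_by cs => cs.length
  decreasing_by
    · simp
    · have := List.length_dropWhile_le (fun d => !pvIsL d) rest
      simp; omega

def separa_num_letra_alt (string : String) : List String := pvGoB string.toList

-- ===== PRECONDITION & SPEC =====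
def Spec_separa_num_letra (string : String) (out : List String) : Prop := out = separa_num_letra_alt string
instance (string : String) (out : List String) : Decidable (Spec_separa_num_letra string out) := by unfold Spec_separa_num_letra; infer_instance

-- ===== CLAIM (what is proved, stated in full; the proofs are below) =====
def Claim_equal_separa_num_letra : Prop := ∀ (string : String), Dom_separa_num_letra string → Spec_separa_num_letra string (separa_num_letra string)

-- ===== LEMMAS AND PROOFS =====

-- A's loop body with the already-emitted prefix factored out
def pvAux : List Char → List Char → List String
  | valor, [] => if valor = [] then [] else [String.ofList valor]
  | valor, c :: rest =>
    if pvIsL c then (if valor = [] then [] else [String.ofList valor]) ++ String.ofList [c] :: pvAux [] rest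
    else pvAux (valor ++ [c]) rest

lemma pvLoopA_eq : ∀ (cs : List Char) (vetor : List String) (valor : List Char),
    pvLoopA cs vetor valor = vetor ++ pvAux valor cs := by
  intro cs
  induction cs with
  | nil => intro vetor valor; by_cases h : valor = [] <;> simp [pvLoopA, pvAux, h]
  | cons c rest ih =>
    intro vetor valor
    by_cases hl : pvIsL c
    · by_cases h : valor = [] <;> simp [pvLoopA, pvAux, hl, h, ih]
    · simp [pvLoopA, pvAux, hl, ih]

lemma pvAux_go : ∀ cs : List Char,
    (pvAux [] cs = pvGoB cs) ∧
    (∀ p : List Char, p ≠ [] →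
      pvAux p cs = String.ofList (p ++ cs.takeWhile (fun d => !pvIsL d)) ::
        pvGoB (cs.dropWhile (fun d => !pvIsL d))) := by
  intro cs
  induction cs with
  | nil =>
    constructor
    · simp [pvAux, pvGoB]
    · intro p hp; simp [pvAux, pvGoB, hp]
  | cons c rest ih =>
    obtain ⟨ih0, ih1⟩ := ih
    by_cases hl : pvIsL c
    · constructor
      · simp [pvAux, pvGoB, hl, ih0]
      · intro p hp
        simp [pvAux, pvGoB, hl, hp, ih0, List.takeWhile, List.dropWhile]
    · constructor
      · rw [show pvAux [] (c :: rest) = pvAux [c] rest from by simp [pvAux, hl]]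
        rw [ih1 [c] (by simp)]
        simp [pvGoB, hl]
      · intro p hp
        rw [show pvAux p (c :: rest) = pvAux (p ++ [c]) rest from by simp [pvAux, hl]]
        rw [ih1 (p ++ [c]) (by simp)]
        simp [List.takeWhile, List.dropWhile, hl]

-- ===== VERDICT (by name: the statement is the Claim_ definition above) =====
theorem separa_num_letra_spec : Claim_equal_separa_num_letra := by
  intro s _
  unfold Spec_separa_num_letra separa_num_letra separa_num_letra_alt
  rw [pvLoopA_eq, (pvAux_go s.toList).1]
  simp
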